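-- pv_equiv track=rewrite | github.com/Venka03/Leet-Code | 2017.grid_game.py | simulate_max_path
-- ===== SOURCE A (Python) =====
-- def simulate_max_path(grid):
--     i = 0
--     j = 0
--     total = 0
--     while i != 1 or j != len(grid[0]):
--         total += grid[i][j]
--         grid[i][j] = 0
--         if i==1:
--             j += 1
--         else:
--             sum_top = sum(grid[i][j+1:]) + grid[1][-1]
--             sum_bottom = sum(grid[i+1][j:])
--             if (sum_top > sum_bottom):
--                 j += 1
--             elif (sum_bottom > sum_top and grid[i][j+1] > grid[i+1][j]):
--                 j += 1
--             else:
--                 i += 1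
--     return total
-- ===== SOURCE B (Python) =====
-- def simulate_max_path(grid):
--     # Greedy walk through a 2 x n grid: keep rolling suffix sums so each
--     # decision reuses the previous one's sums; the grid is not mutated.
--     top, bottom = grid[0], grid[1]
--     total = top[0]                           # sum of the top cells taken so far
--     above = sum(top) - top[0] + bottom[-1]   # cells still ahead if we stay on top
--     below = sum(bottom)                      # cells ahead if we drop down now
--     j = 0
--     while above > below or (below > above and top[j + 1] > bottom[j]):
--         below -= bottom[j]
--         j += 1
--         above -= top[j]
--         total += top[j]
--     return total + below
-- ===== Notes on version B (the rewrite author's own statement) =====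
-- stated objective: alternative
-- what changed: A re-sums both row slices from scratch at every top-row column and mutates the grid; B keeps rolling suffix sums so each greedy decision is O(1) and does not mutate; Pre_ restricts to rectangular 2 x n grids (the task's natural domain): on ragged grids A either raises IndexError or silently truncates/extends the rows, an artefact of its slice sums.
-- outside the precondition, e.g. on simulate_max_path([[1, 0], [5, 9, 9]]): A returns 15, B returns 24
import Mathlib
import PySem

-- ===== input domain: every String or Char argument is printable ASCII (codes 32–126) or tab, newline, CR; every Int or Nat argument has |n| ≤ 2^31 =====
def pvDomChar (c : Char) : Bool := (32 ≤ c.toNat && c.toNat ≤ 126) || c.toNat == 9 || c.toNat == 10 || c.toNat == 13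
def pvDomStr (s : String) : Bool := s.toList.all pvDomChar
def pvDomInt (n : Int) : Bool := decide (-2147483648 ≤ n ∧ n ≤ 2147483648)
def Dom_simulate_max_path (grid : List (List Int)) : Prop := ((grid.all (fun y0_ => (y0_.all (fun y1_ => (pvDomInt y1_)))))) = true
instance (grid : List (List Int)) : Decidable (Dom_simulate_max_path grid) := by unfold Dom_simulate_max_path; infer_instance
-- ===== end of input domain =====

-- B makes each greedy decision from rolling suffix sums instead of A's re-summation of slices at
-- every step; equivalence is about the RETURN value only: A zeroes visited cells of grid in place, B does not mutate.

-- ===== PORT A =====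
-- grid[1][-1] (negative index on a nonempty row under Pre_)
def pyLast (l : List Int) : Int := l.getD (l.length - 1) 0

-- the while loop of A; fuel only makes the recursion total, it never runs out on Pre_ inputs
def simAloop (fuel : Nat) (grid : List (List Int)) (i j : Nat) (total : Int) : Int :=
  match fuel with
  | 0 => total
  | fuel + 1 =>
    if i ≠ 1 ∨ j ≠ (grid.getD 0 []).length then
      let row := grid.getD i []
      let total := total + row.getD j 0
      let grid := grid.set i (row.set j 0)
      if i = 1 then
        simAloop fuel grid i (j + 1) total
      else
        let sum_top := ((grid.getD i []).drop (j + 1)).sum + pyLast (grid.getD 1 [])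
        let sum_bottom := ((grid.getD (i + 1) []).drop j).sum
        if sum_top > sum_bottom then
          simAloop fuel grid i (j + 1) total
        else if sum_bottom > sum_top ∧ (grid.getD i []).getD (j + 1) 0 > (grid.getD (i + 1) []).getD j 0 then
          simAloop fuel grid i (j + 1) total
        else
          simAloop fuel grid (i + 1) j total
    else total

def simulate_max_path (grid : List (List Int)) : Int :=
  simAloop ((grid.getD 0 []).length + (grid.getD 1 []).length + 2) grid 0 0 0

-- ===== PORT B =====
-- Source B's while loop: rolling sums above = sum(top[j+1:]) + bottom[-1], below = sum(bottom[j:]),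
-- total = sum(top[:j+1]), each updated incrementally per step; returns the final (total, below)
def simBloop (fuel : Nat) (top bottom : List Int) (j : Nat)
    (above below total : Int) : Int × Int :=
  match fuel with
  | 0 => (total, below)
  | fuel + 1 =>
    if above > below ∨ (below > above ∧ top.getD (j + 1) 0 > bottom.getD j 0) then
      let below := below - bottom.getD j 0
      let j := j + 1
      let above := above - top.getD j 0
      let total := total + top.getD j 0
      simBloop fuel top bottom j above below total
    else (total, below)

def simulate_max_path_alt (grid : List (List Int)) : Int :=
  let top := grid.getD 0 []
  let bottom := grid.getD 1 []
  let total := top.getD 0 0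
  let above := top.sum - top.getD 0 0 + bottom.getD (bottom.length - 1) 0
  let below := bottom.sum
  let r := simBloop (top.length + 1) top bottom 0 above below total
  r.1 + r.2

-- ===== PRECONDITION & SPEC =====
-- Pre_ restricts to rectangular 2 x n grids, the task's natural domain: with fewer than 2 rows or
-- an empty first row A raises IndexError, and on ragged grids A's slice sums silently truncate or
-- extend a row (an artefact of its implementation) or raise, depending on how far the walk gets.
def Pre_simulate_max_path (grid : List (List Int)) : Prop :=
  2 ≤ grid.length ∧ (grid.getD 0 []) ≠ [] ∧
  (grid.getD 0 []).length = (grid.getD 1 []).length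

instance (grid : List (List Int)) : Decidable (Pre_simulate_max_path grid) := by
  unfold Pre_simulate_max_path; infer_instance

def pvWitness_simulate_max_path : List (List Int) := [[2, 5, 4], [1, 5, 1]]

def Spec_simulate_max_path (grid : List (List Int)) (out : Int) : Prop := out = simulate_max_path_alt grid
instance (grid : List (List Int)) (out : Int) : Decidable (Spec_simulate_max_path grid out) := by unfold Spec_simulate_max_path; infer_instance

-- ===== CLAIM (what is proved, stated in full; the proofs are below) =====
def Claim_equal_simulate_max_path : Prop := ∀ (grid : List (List Int)), Dom_simulate_max_path grid → Pre_simulate_max_path grid → Spec_simulate_max_path grid (simulate_max_path grid)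

-- ===== LEMMAS AND PROOFS =====

-- the greedy decision, phrased on the original rows
def mvR (top bottom : List Int) (last : Int) (j : Nat) : Prop :=
  (top.drop (j + 1)).sum + last > (bottom.drop j).sum ∨
  ((bottom.drop j).sum > (top.drop (j + 1)).sum + last ∧ top.getD (j + 1) 0 > bottom.getD j 0)

-- proof-side pure loop: the column where the walk leaves the top row
def specLoop (fuel : Nat) (top bottom : List Int) (last : Int) (j : Nat) : Nat :=
  match fuel with
  | 0 => j
  | fuel + 1 =>
    if (top.drop (j + 1)).sum + last > (bottom.drop j).sum ∨
        ((bottom.drop j).sum > (top.drop (j + 1)).sum + last ∧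
          top.getD (j + 1) 0 > bottom.getD j 0) then
      specLoop fuel top bottom last (j + 1)
    else j

theorem getD_headD (l : List Int) (i : Nat) : l.getD i 0 = (l.drop i).headD 0 := by
  simp [List.getD_eq_getElem?_getD, List.headD_eq_head?_getD, List.head?_drop]

theorem drop_set_succ (l : List Int) (j : Nat) (v : Int) :
    (l.set j v).drop (j + 1) = l.drop (j + 1) := by
  induction l generalizing j with
  | nil => simp
  | cons x xs ih => cases j <;> simp [ih]

theorem drop_succ_tail (l : List Int) (i : Nat) : l.drop (i + 1) = (l.drop i).tail := by
  rw [← List.drop_drop]; simp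

theorem take_succ_sum (l : List Int) (k : Nat) :
    (l.take (k + 1)).sum = l.headD 0 + (l.tail.take k).sum := by
  cases l <;> simp

theorem sum_drop_succ (l : List Int) (j : Nat) :
    (l.drop j).sum = l.getD j 0 + (l.drop (j + 1)).sum := by
  rw [getD_headD, drop_succ_tail]
  cases h : l.drop j <;> simp

theorem sum_take_drop (l : List Int) (k : Nat) :
    (l.take k).sum + (l.drop k).sum = l.sum := by
  conv_rhs => rw [← List.take_append_drop k l]
  simp

theorem specLoop_step_pos (top bottom : List Int) (last : Int) (fb j : Nat)
    (h : mvR top bottom last j) :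
    specLoop (fb + 1) top bottom last j = specLoop fb top bottom last (j + 1) := by
  unfold mvR at h
  simp only [specLoop]
  rw [if_pos h]

theorem specLoop_step_neg (top bottom : List Int) (last : Int) (fb j : Nat)
    (h : ¬ mvR top bottom last j) :
    specLoop (fb + 1) top bottom last j = j := by
  unfold mvR at h
  simp only [specLoop]
  rw [if_neg h]

theorem specLoop_ge (top bottom : List Int) (last : Int) (fb j : Nat) :
    j ≤ specLoop fb top bottom last j := by
  induction fb generalizing j with
  | zero => simp [specLoop]
  | succ fb ih =>
    by_cases h : mvR top bottom last j
    · rw [specLoop_step_pos top bottom last fb j h]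
      exact le_trans (Nat.le_succ j) (ih (j + 1))
    · rw [specLoop_step_neg top bottom last fb j h]

-- at the last column both suffix sums are bottom's last cell, so the walk dives
theorem not_mvR_last (top bottom : List Int) (hn : top ≠ [])
    (hlast : (bottom.drop (top.length - 1)).sum = bottom.getD (bottom.length - 1) 0) :
    ¬ mvR top bottom (bottom.getD (bottom.length - 1) 0) (top.length - 1) := by
  have hn1 : top.length - 1 + 1 = top.length := by
    have : 0 < top.length := List.length_pos_iff.mpr hn
    omega
  unfold mvR
  rw [hn1, List.drop_length, hlast]
  simp

theorem specLoop_le (top bottom : List Int) (hn : top ≠ [])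
    (hlast : (bottom.drop (top.length - 1)).sum = bottom.getD (bottom.length - 1) 0)
    (fb j : Nat) (hj : j ≤ top.length - 1) :
    specLoop fb top bottom (bottom.getD (bottom.length - 1) 0) j ≤ top.length - 1 := by
  induction fb generalizing j with
  | zero => simpa [specLoop] using hj
  | succ fb ih =>
    by_cases h : mvR top bottom (bottom.getD (bottom.length - 1) 0) j
    · rw [specLoop_step_pos top bottom _ fb j h]
      have : j ≠ top.length - 1 := by
        rintro rfl; exact not_mvR_last top bottom hn hlast h
      exact ih (j + 1) (by omega)
    · rw [specLoop_step_neg top bottom _ fb j h]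
      exact hj

-- B's loop with correct rolling sums computes the stop column's closed-form pair
theorem simBloop_spec (top bottom : List Int) (last : Int) (fuel : Nat) :
    ∀ (j : Nat) (total : Int),
      simBloop fuel top bottom j ((top.drop (j + 1)).sum + last) ((bottom.drop j).sum) total
        = (total + ((top.drop (j + 1)).take (specLoop fuel top bottom last j - j)).sum,
           (bottom.drop (specLoop fuel top bottom last j)).sum) := by
  induction fuel with
  | zero => intro j total; simp [simBloop, specLoop]
  | succ fuel ih =>
    intro j total
    by_cases hc : mvR top bottom last j
    · have hc' := hc; unfold mvR at hc'
      rw [specLoop_step_pos top bottom last fuel j hc]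
      simp only [simBloop]
      rw [if_pos hc']
      have eb : (bottom.drop j).sum - bottom.getD j 0 = (bottom.drop (j + 1)).sum := by
        have := sum_drop_succ bottom j; omega
      have et : (top.drop (j + 1)).sum + last - top.getD (j + 1) 0
          = (top.drop (j + 1 + 1)).sum + last := by
        have := sum_drop_succ top (j + 1); omega
      rw [eb, et, ih (j + 1) (total + top.getD (j + 1) 0)]
      set st := specLoop fuel top bottom last (j + 1) with hst
      have hge : j + 1 ≤ st := specLoop_ge top bottom last fuel (j + 1)
      have hk : st - j = (st - (j + 1)) + 1 := by omega
      rw [Prod.mk.injEq]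
      refine ⟨?_, rfl⟩
      rw [hk, take_succ_sum, ← drop_succ_tail, ← getD_headD]
      ring
    · have hc' := hc; unfold mvR at hc'
      rw [specLoop_step_neg top bottom last fuel j hc]
      simp only [simBloop]
      rw [if_neg hc']
      simp

-- one step of A's loop on the bottom row (i = 1, j < n)
theorem simAloop_step1 (fuel j : Nat) (a b : List Int) (rest : List (List Int)) (total : Int)
    (hj : j ≠ a.length) :
    simAloop (fuel + 1) (a :: b :: rest) 1 j total
      = simAloop fuel (a :: b.set j 0 :: rest) 1 (j + 1) (total + b.getD j 0) := by
  simp only [simAloop]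
  rw [if_pos (Or.inr (by simpa using hj))]
  rfl

-- exit of A's loop (i = 1, j = n)
theorem simAloop_exit (fuel : Nat) (a b : List Int) (rest : List (List Int)) (total : Int) :
    simAloop (fuel + 1) (a :: b :: rest) 1 a.length total = total := by
  simp only [simAloop]
  rw [if_neg (by simp)]

-- one step of A's loop on the top row (i = 0, j < n), branching laid bare
theorem simAloop_step0 (fuel j : Nat) (a b : List Int) (rest : List (List Int)) (total : Int) :
    simAloop (fuel + 1) (a :: b :: rest) 0 j total
      = (if ((a.set j 0).drop (j + 1)).sum + pyLast b > (b.drop j).sum then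
           simAloop fuel (a.set j 0 :: b :: rest) 0 (j + 1) (total + a.getD j 0)
         else if (b.drop j).sum > ((a.set j 0).drop (j + 1)).sum + pyLast b ∧
             (a.set j 0).getD (j + 1) 0 > b.getD j 0 then
           simAloop fuel (a.set j 0 :: b :: rest) 0 (j + 1) (total + a.getD j 0)
         else simAloop fuel (a.set j 0 :: b :: rest) 1 j (total + a.getD j 0)) := by
  simp only [simAloop]
  rw [if_pos (Or.inl (by simp))]
  rfl

-- A's second phase: walking the bottom row from column j to n-1
theorem simAloop_phase1 (fuel : Nat) :
    ∀ (j : Nat) (a b : List Int) (rest : List (List Int)) (total : Int),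
      j ≤ a.length → a.length - j < fuel →
      simAloop fuel (a :: b :: rest) 1 j total
        = total + ((b.drop j).take (a.length - j)).sum := by
  induction fuel with
  | zero => intro j a b rest total h1 h2; omega
  | succ fuel ih =>
    intro j a b rest total h1 h2
    by_cases hj : j = a.length
    · subst hj
      rw [simAloop_exit]
      simp
    · have hjlt : j < a.length := lt_of_le_of_ne h1 hj
      rw [simAloop_step1 fuel j a b rest total hj,
          ih (j + 1) a (b.set j 0) rest _ (by omega) (by omega)]
      rw [drop_set_succ b j 0]
      have hk : a.length - j = (a.length - (j + 1)) + 1 := by omega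
      rw [hk, take_succ_sum, ← drop_succ_tail, getD_headD]
      ring

-- A's first phase equals the stop-column search plus closed-form sums
theorem simAloop_phase0 (top bottom : List Int)
    (hn : top ≠ [])
    (hlast : (bottom.drop (top.length - 1)).sum = bottom.getD (bottom.length - 1) 0)
    (fuel : Nat) :
    ∀ (fb j : Nat) (a : List Int) (rest : List (List Int)) (total : Int),
      a.drop j = top.drop j → a.length = top.length → j < top.length →
      top.length - j + 1 < fuel → top.length - j ≤ fb →
      simAloop fuel (a :: bottom :: rest) 0 j total
        = total
          + ((top.drop j).take
              ((specLoop fb top bottom (bottom.getD (bottom.length - 1) 0) j) + 1 - j)).sum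
          + ((bottom.drop
                (specLoop fb top bottom (bottom.getD (bottom.length - 1) 0) j)).take
              (top.length - (specLoop fb top bottom (bottom.getD (bottom.length - 1) 0) j))).sum := by
  set last := bottom.getD (bottom.length - 1) 0 with hlastdef
  induction fuel with
  | zero => intro fb j a rest total h1 h2 h3 h4 h5; omega
  | succ fuel ih =>
    intro fb j a rest total h1 h2 h3 h4 h5
    obtain ⟨fb, rfl⟩ : ∃ fb2, fb = fb2 + 1 := ⟨fb - 1, by omega⟩
    have h1' : a.drop (j + 1) = top.drop (j + 1) := by
      rw [drop_succ_tail, drop_succ_tail, h1]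
    have haset : (a.set j 0).drop (j + 1) = top.drop (j + 1) := by
      rw [drop_set_succ]; exact h1'
    have hread : a.getD j 0 = (top.drop j).headD 0 := by rw [getD_headD, h1]
    have hreadnext : (a.set j 0).getD (j + 1) 0 = top.getD (j + 1) 0 := by
      rw [getD_headD, haset, ← getD_headD]
    have hlen : (a.set j 0).length = top.length := by simp [h2]
    have hpl : pyLast bottom = last := rfl
    rw [simAloop_step0, haset, hreadnext, hpl, hread]
    by_cases hc : mvR top bottom last j
    · -- move right: both branches of A's if/elif recurse at column j+1 on the top row
      rw [specLoop_step_pos top bottom last fb j hc]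
      have hjlt : j < top.length - 1 := by
        rcases Nat.lt_or_ge j (top.length - 1) with h | h
        · exact h
        · exfalso
          have hje : j = top.length - 1 := by omega
          rw [hje] at hc
          exact not_mvR_last top bottom hn hlast hc
      have step := ih fb (j + 1) (a.set j 0) rest (total + (top.drop j).headD 0)
        haset hlen (by omega) (by omega) (by omega)
      have hres :
          (if (top.drop (j + 1)).sum + last > (bottom.drop j).sum then
              simAloop fuel (a.set j 0 :: bottom :: rest) 0 (j + 1) (total + (top.drop j).headD 0)
            else if (bottom.drop j).sum > (top.drop (j + 1)).sum + last ∧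
                top.getD (j + 1) 0 > bottom.getD j 0 then
              simAloop fuel (a.set j 0 :: bottom :: rest) 0 (j + 1) (total + (top.drop j).headD 0)
            else simAloop fuel (a.set j 0 :: bottom :: rest) 1 j (total + (top.drop j).headD 0))
            = simAloop fuel (a.set j 0 :: bottom :: rest) 0 (j + 1) (total + (top.drop j).headD 0) := by
        unfold mvR at hc
        rcases hc with h | h
        · rw [if_pos h]
        · rcases em ((top.drop (j + 1)).sum + last > (bottom.drop j).sum) with h' | h'
          · rw [if_pos h']
          · rw [if_neg h', if_pos h]
      rw [hres, step]
      set jst := specLoop fb top bottom last (j + 1) with hjst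
      have hge : j + 1 ≤ jst := specLoop_ge top bottom last fb (j + 1)
      have hk : jst + 1 - j = (jst + 1 - (j + 1)) + 1 := by omega
      rw [hk, take_succ_sum, ← drop_succ_tail]
      ring
    · -- move down: A enters phase 1 at column j, the walk leaves the top row here
      have h1c : ¬((top.drop (j + 1)).sum + last > (bottom.drop j).sum) :=
        fun h => hc (Or.inl h)
      have h2c : ¬((bottom.drop j).sum > (top.drop (j + 1)).sum + last ∧
          top.getD (j + 1) 0 > bottom.getD j 0) :=
        fun h => hc (Or.inr h)
      rw [specLoop_step_neg top bottom last fb j hc, if_neg h1c, if_neg h2c]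
      rw [simAloop_phase1 fuel j (a.set j 0) bottom rest (total + (top.drop j).headD 0)
            (by omega) (by omega)]
      have ht1 : (top.drop j).take (j + 1 - j) = (top.drop j).take 1 := by norm_num
      have ht2 : ((top.drop j).take 1).sum = (top.drop j).headD 0 := by
        cases h : top.drop j <;> simp
      rw [hlen, ht1, ht2]

-- ===== VERDICT (by name: the statement is the Claim_ definition above) =====
theorem simulate_max_path_spec : Claim_equal_simulate_max_path := by
  intro grid _ hpre
  obtain ⟨hlen2, hne, hl⟩ := hpre
  obtain ⟨top, bottom, rest, rfl⟩ : ∃ r0 r1 rest, grid = r0 :: r1 :: rest := by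
    match grid, hlen2 with
    | r0 :: r1 :: rest, _ => exact ⟨r0, r1, rest, rfl⟩
  simp only [List.getD_cons_succ, List.getD_cons_zero] at hne hl
  unfold Spec_simulate_max_path simulate_max_path simulate_max_path_alt
  simp only [List.getD_cons_succ, List.getD_cons_zero]
  have hn : 0 < top.length := List.length_pos_iff.mpr hne
  set last := bottom.getD (bottom.length - 1) 0 with hlastdef
  have hlast : (bottom.drop (top.length - 1)).sum = last := by
    rw [hlastdef, sum_drop_succ bottom (top.length - 1)]
    have : top.length - 1 + 1 = bottom.length := by omega
    rw [this, List.drop_length, hl]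
    simp
  rw [simAloop_phase0 top bottom hne hlast (top.length + bottom.length + 2)
      (top.length + 1) 0 top rest 0 rfl rfl hn (by omega) (by omega)]
  have est : top.sum - top.getD 0 0 + last = (top.drop (0 + 1)).sum + last := by
    have h := sum_drop_succ top 0
    rw [List.drop_zero] at h
    omega
  have esb : bottom.sum = (bottom.drop 0).sum := by rw [List.drop_zero]
  rw [est, esb, simBloop_spec top bottom last (top.length + 1) 0 (top.getD 0 0)]
  set jst := specLoop (top.length + 1) top bottom last 0 with hjst
  have hjle : jst ≤ top.length - 1 :=
    specLoop_le top bottom hne hlast (top.length + 1) 0 (by omega)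
  simp only [List.drop_zero, Nat.sub_zero]
  have e1 : top.getD 0 0 + ((top.drop (0 + 1)).take jst).sum = (top.take (jst + 1)).sum := by
    rw [take_succ_sum, getD_headD]
    simp [List.drop_one]
  have e2 : ((bottom.drop jst).take (top.length - jst)).sum = (bottom.drop jst).sum := by
    have hdd : (bottom.drop jst).drop (top.length - jst) = bottom.drop top.length := by
      rw [List.drop_drop]
      congr 1
      omega
    have hz : (bottom.drop top.length).sum = 0 := by
      rw [hl, List.drop_length]; rfl
    have := sum_take_drop (bottom.drop jst) (top.length - jst)
    rw [hdd, hz] at this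
    omega
  rw [e2, ← e1]
  ring
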